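-- pv_equiv track=rewrite | github.com/Jnpaul1984/Cricksy_Scorer | backend/services/analytics_case_study.py | _aggregate_per_over
-- ===== SOURCE A (Python) =====
-- from collections import defaultdict
-- from typing import Any, Literal
--
-- def _aggregate_per_over(
--     deliveries: list[dict[str, Any]], innings_number: int
-- ) -> tuple[dict[int, int], dict[int, int]]:
--     """
--     Aggregate runs and wickets per over for a specific innings.
--
--     Returns (per_over_runs, per_over_wickets) dicts keyed by over_number.
--     """
--     per_over_runs: dict[int, int] = defaultdict(int)
--     per_over_wickets: dict[int, int] = defaultdict(int)
--
--     for d in deliveries: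
--         inning = d.get("inning", 1)
--         if inning != innings_number:
--             continue
--
--         over_num = d.get("over_number", 1)
--         # Total runs for this ball
--         runs = d.get("runs_off_bat", 0) + d.get("extra_runs", 0)
--         # Fallback to runs_scored if breakdown not available
--         if runs == 0 and d.get("runs_scored"):
--             runs = d.get("runs_scored", 0)
--
--         per_over_runs[over_num] += runs
--
--         if d.get("is_wicket"):
--             per_over_wickets[over_num] += 1
--
--     return dict(per_over_runs), dict(per_over_wickets)
-- ===== SOURCE B (Python) =====
-- from typing import Any
--
--
-- def _ball_runs(d: dict[str, Any]) -> int: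
--     """Runs for one ball: off-bat + extras, falling back to runs_scored."""
--     r = d.get("runs_off_bat", 0) + d.get("extra_runs", 0)
--     if r == 0 and d.get("runs_scored"):
--         return d.get("runs_scored", 0)
--     return r
--
--
-- def _aggregate_per_over(
--     deliveries: list[dict[str, Any]], innings_number: int
-- ) -> tuple[dict[int, int], dict[int, int]]:
--     """Group-by formulation: list the distinct over numbers (and, separately,
--     the overs in which a wicket fell, in first-wicket order), then answer each
--     over with an inner scan of the innings' deliveries."""
--     balls = [d for d in deliveries if d.get("inning", 1) == innings_number]
--
--     overs: list[int] = []
--     for d in balls: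
--         o = d.get("over_number", 1)
--         if o not in overs:
--             overs.append(o)
--
--     wicket_overs: list[int] = []
--     for d in balls:
--         if d.get("is_wicket"):
--             o = d.get("over_number", 1)
--             if o not in wicket_overs:
--                 wicket_overs.append(o)
--
--     def over_balls(o: int) -> list[dict[str, Any]]:
--         return [d for d in balls if d.get("over_number", 1) == o]
--
--     per_over_runs = {o: sum(_ball_runs(d) for d in over_balls(o)) for o in overs}
--     per_over_wickets = {
--         o: sum(1 for d in over_balls(o) if d.get("is_wicket")) for o in wicket_overs
--     }
--     return per_over_runs, per_over_wickets
-- ===== Notes on version B (the rewrite author's own statement) =====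
-- stated objective: alternative
-- what changed: A's single pass accumulating into two defaultdicts is replaced by a group-by: one pass lists the distinct over numbers (and, separately, the overs with a wicket in first-wicket order), then each over's runs and wickets are computed by an inner scan of the innings' deliveries.
import Mathlib
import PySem

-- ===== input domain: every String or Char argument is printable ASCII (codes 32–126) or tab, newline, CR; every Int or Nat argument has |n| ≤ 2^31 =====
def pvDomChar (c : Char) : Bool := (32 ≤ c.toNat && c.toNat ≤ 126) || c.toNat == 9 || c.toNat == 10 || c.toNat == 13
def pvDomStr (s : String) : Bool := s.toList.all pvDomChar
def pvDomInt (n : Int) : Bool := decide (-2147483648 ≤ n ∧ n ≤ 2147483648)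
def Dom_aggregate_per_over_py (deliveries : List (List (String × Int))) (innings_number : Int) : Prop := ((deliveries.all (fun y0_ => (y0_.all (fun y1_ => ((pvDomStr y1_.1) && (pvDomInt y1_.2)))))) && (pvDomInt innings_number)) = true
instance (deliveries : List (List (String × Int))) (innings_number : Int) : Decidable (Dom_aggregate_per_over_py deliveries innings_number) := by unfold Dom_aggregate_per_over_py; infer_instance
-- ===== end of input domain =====

-- B replaces A's single accumulating pass by a group-by: distinct over keys first, then an inner scan per over (alternative decomposition, same results).

-- shared field accessor: d.get(k, dflt) on the delivery dict (first-match association list)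
def pvGet (d : List (String × Int)) (k : String) (dflt : Int) : Int :=
  (PySem.Dict.mk d).getD k dflt

-- ===== PORT A =====
def aggregate_per_over_py (deliveries : List (List (String × Int))) (innings_number : Int) : (List (Int × Int)) × (List (Int × Int)) :=
  let st := deliveries.foldl
    (fun (st : PySem.Dict Int Int × PySem.Dict Int Int) d =>
      let inning := pvGet d "inning" 1
      if inning ≠ innings_number then st
      else
        let over_num := pvGet d "over_number" 1
        let runs0 := pvGet d "runs_off_bat" 0 + pvGet d "extra_runs" 0
        let runs := if runs0 = 0 ∧ pvGet d "runs_scored" 0 ≠ 0 then pvGet d "runs_scored" 0 else runs0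
        let r := st.1.modify over_num 0 (· + runs)
        let w := if pvGet d "is_wicket" 0 ≠ 0 then st.2.modify over_num 0 (· + 1) else st.2
        (r, w))
    (PySem.Dict.empty, PySem.Dict.empty)
  (st.1.items, st.2.items)

-- ===== PORT B =====
def pvBallRuns (d : List (String × Int)) : Int :=
  let r := pvGet d "runs_off_bat" 0 + pvGet d "extra_runs" 0
  if r = 0 ∧ pvGet d "runs_scored" 0 ≠ 0 then pvGet d "runs_scored" 0 else r

def aggregate_per_over_py_alt (deliveries : List (List (String × Int))) (innings_number : Int) : (List (Int × Int)) × (List (Int × Int)) :=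
  let balls := deliveries.filter (fun d => pvGet d "inning" 1 == innings_number)
  let overs := balls.foldl
    (fun (acc : List Int) d =>
      let o := pvGet d "over_number" 1
      if o ∈ acc then acc else acc ++ [o]) []
  let wicket_overs := balls.foldl
    (fun (acc : List Int) d =>
      if pvGet d "is_wicket" 0 ≠ 0 then
        let o := pvGet d "over_number" 1
        if o ∈ acc then acc else acc ++ [o]
      else acc) []
  let over_balls := fun (o : Int) => balls.filter (fun d => pvGet d "over_number" 1 == o)
  let per_over_runs := overs.map (fun o => (o, ((over_balls o).map pvBallRuns).sum))
  let per_over_wickets := wicket_overs.map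
    (fun o => (o, (((over_balls o).filter (fun d => pvGet d "is_wicket" 0 ≠ 0)).length : Int)))
  (per_over_runs, per_over_wickets)

-- ===== PRECONDITION & SPEC =====
def Spec_aggregate_per_over_py (deliveries : List (List (String × Int))) (innings_number : Int) (out : (List (Int × Int)) × (List (Int × Int))) : Prop := out = aggregate_per_over_py_alt deliveries innings_number
instance (deliveries : List (List (String × Int))) (innings_number : Int) (out : (List (Int × Int)) × (List (Int × Int))) : Decidable (Spec_aggregate_per_over_py deliveries innings_number out) := by unfold Spec_aggregate_per_over_py; infer_instance

-- ===== CLAIM (what is proved, stated in full; the proofs are below) =====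
def Claim_equal_aggregate_per_over_py : Prop := ∀ (deliveries : List (List (String × Int))) (innings_number : Int), Dom_aggregate_per_over_py deliveries innings_number → Spec_aggregate_per_over_py deliveries innings_number (aggregate_per_over_py deliveries innings_number)

-- ===== LEMMAS AND PROOFS =====

-- A's single fold over the pair of dicts is the pair of modify-folds over the filtered list.
theorem pv_fold_split (innings_number : Int) (l : List (List (String × Int)))
    (r w : PySem.Dict Int Int) :
    l.foldl
      (fun (st : PySem.Dict Int Int × PySem.Dict Int Int) d =>
        let inning := pvGet d "inning" 1
        if inning ≠ innings_number then st
        else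
          let over_num := pvGet d "over_number" 1
          let runs0 := pvGet d "runs_off_bat" 0 + pvGet d "extra_runs" 0
          let runs := if runs0 = 0 ∧ pvGet d "runs_scored" 0 ≠ 0 then pvGet d "runs_scored" 0 else runs0
          let r' := st.1.modify over_num 0 (· + runs)
          let w' := if pvGet d "is_wicket" 0 ≠ 0 then st.2.modify over_num 0 (· + 1) else st.2
          (r', w'))
      (r, w)
    = ((l.filter (fun d => pvGet d "inning" 1 == innings_number)).foldl
        (fun (dct : PySem.Dict Int Int) d =>
          dct.modify (pvGet d "over_number" 1) 0 (· + pvBallRuns d)) r,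
       ((l.filter (fun d => pvGet d "inning" 1 == innings_number)).filter
          (fun d => pvGet d "is_wicket" 0 ≠ 0)).foldl
        (fun (dct : PySem.Dict Int Int) d =>
          dct.modify (pvGet d "over_number" 1) 0 (· + 1)) w) := by
  induction l generalizing r w with
  | nil => rfl
  | cons d tl ih =>
    simp only [List.foldl_cons]
    by_cases hin : pvGet d "inning" 1 = innings_number
    · rw [if_neg (not_not_intro hin), List.filter_cons_of_pos (by simp [hin])]
      by_cases hw : pvGet d "is_wicket" 0 = 0
      · rw [List.filter_cons_of_neg (by simp [hw])]
        simp only [if_neg (not_not_intro hw), List.foldl_cons]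
        rw [ih]
        rfl
      · rw [List.filter_cons_of_pos (by simp [hw])]
        simp only [if_pos hw, List.foldl_cons]
        rw [ih]
        rfl
    · rw [if_pos hin, List.filter_cons_of_neg (by simp [hin])]
      exact ih r w

-- lookup in a modify-accumulate fold: starting value plus the sum of this key's contributions
theorem pv_getD_foldl_modify_add (l : List (List (String × Int))) (key v : List (String × Int) → Int)
    (d : PySem.Dict Int Int) (k : Int) :
    (l.foldl (fun (dct : PySem.Dict Int Int) x => dct.modify (key x) 0 (· + v x)) d).getD k 0
      = d.getD k 0 + ((l.filter (fun x => key x == k)).map v).sum := by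
  induction l generalizing d with
  | nil => simp
  | cons x tl ih =>
    simp only [List.foldl_cons, ih, PySem.Dict.getD_modify]
    by_cases hk : k = key x
    · rw [if_pos hk, List.filter_cons_of_pos (by simp [hk])]
      subst hk; simp; ring
    · rw [if_neg hk, List.filter_cons_of_neg (by simp [Ne.symm hk])]

-- B's dedup loop over extracted keys is set(map key l)
theorem pv_foldl_dedup_key (l : List (List (String × Int))) (key : List (String × Int) → Int) :
    l.foldl (fun (acc : List Int) d =>
        let o := key d
        if o ∈ acc then acc else acc ++ [o]) []
      = PySem.Set.ofList (l.map key) := by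
  rw [PySem.Set.ofList_eq_foldl, List.foldl_map]
  refine PySem.List.foldl_congr_mem _ _ _ _ ?_
  intro acc x _
  simp [PySem.Set.add_eq_ite]

-- B's guarded dedup loop is the dedup loop over the filtered list
theorem pv_foldl_dedup_guard (l : List (List (String × Int))) (p : List (String × Int) → Prop)
    [DecidablePred p] (key : List (String × Int) → Int) (acc : List Int) :
    l.foldl (fun (acc : List Int) d =>
        if p d then
          let o := key d
          if o ∈ acc then acc else acc ++ [o]
        else acc) acc
      = (l.filter (fun d => p d)).foldl (fun (acc : List Int) d =>
          let o := key d
          if o ∈ acc then acc else acc ++ [o]) acc := by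
  induction l generalizing acc with
  | nil => rfl
  | cons x tl ih =>
    by_cases hp : p x
    · rw [List.foldl_cons, if_pos hp, List.filter_cons_of_pos (by simpa), List.foldl_cons, ih]
    · rw [List.foldl_cons, if_neg hp, List.filter_cons_of_neg (by simpa), ih]

-- ===== VERDICT (by name: the statement is the Claim_ definition above) =====
theorem aggregate_per_over_py_spec : Claim_equal_aggregate_per_over_py := by
  intro deliveries innings_number _
  unfold Spec_aggregate_per_over_py aggregate_per_over_py aggregate_per_over_py_alt
  rw [pv_fold_split]
  set balls := deliveries.filter (fun d => pvGet d "inning" 1 == innings_number) with hballs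
  simp only
  rw [Prod.mk.injEq]
  constructor
  · -- runs component
    rw [PySem.Dict.items_eq_map_keys _
        (PySem.Dict.nodup_keys_foldl_modify_key balls (fun d => pvGet d "over_number" 1) 0
          (fun _ x v => v + pvBallRuns x) PySem.Dict.empty (by simp [PySem.Dict.keys_empty])) 0]
    rw [PySem.Dict.keys_foldl_modify_key balls (fun d => pvGet d "over_number" 1) 0
      (fun _ x v => v + pvBallRuns x) PySem.Dict.empty, PySem.Dict.keys_empty,
      PySem.Set.update_nil_left, pv_foldl_dedup_key]
    refine List.map_congr_left ?_
    intro o _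
    rw [pv_getD_foldl_modify_add balls (fun d => pvGet d "over_number" 1) pvBallRuns]
    simp
  · -- wickets component
    set wb := balls.filter (fun d => pvGet d "is_wicket" 0 ≠ 0) with hwb
    rw [PySem.Dict.items_eq_map_keys _
        (PySem.Dict.nodup_keys_foldl_modify_key wb (fun d => pvGet d "over_number" 1) 0
          (fun _ _ v => v + 1) PySem.Dict.empty (by simp [PySem.Dict.keys_empty])) 0]
    rw [PySem.Dict.keys_foldl_modify_key wb (fun d => pvGet d "over_number" 1) 0
      (fun _ _ v => v + 1) PySem.Dict.empty, PySem.Dict.keys_empty, PySem.Set.update_nil_left]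
    rw [pv_foldl_dedup_guard balls (fun d => pvGet d "is_wicket" 0 ≠ 0)
        (fun d => pvGet d "over_number" 1), ← hwb, pv_foldl_dedup_key]
    refine List.map_congr_left ?_
    intro o _
    rw [pv_getD_foldl_modify_add wb (fun d => pvGet d "over_number" 1) (fun _ => 1)]
    simp only [PySem.Dict.getD_empty, zero_add, List.map_const', List.sum_replicate]
    rw [hwb, List.filter_comm]
    simp
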